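-- pv_equiv track=rewrite | github.com/Adri-10/Module-Development-on-Statistical-Functions | Group8.py | cummin
-- ===== SOURCE A (Python) =====
-- def cummin(series):
--     min_list=[]
--     min_list.append(series[0])
--     for i in range(0,len(series)-1):
--         if (min_list[i]<series[i+1]):
--             min_list.append(min_list[i])
--         else:
--             min_list.append(series[i+1])
--     return min_list
-- ===== SOURCE B (Python) =====
-- def cummin(series):
--     return [min(series[:i + 1]) for i in range(len(series))]
-- ===== Notes on version B (the rewrite author's own statement) =====
-- stated objective: alternative
-- what changed: B computes each output position independently as the minimum of the prefix ending there (a slice-and-min per position, no carried state), instead of A's single stateful pass that extends the output by comparing the previous output entry with the next element.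
import Mathlib
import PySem

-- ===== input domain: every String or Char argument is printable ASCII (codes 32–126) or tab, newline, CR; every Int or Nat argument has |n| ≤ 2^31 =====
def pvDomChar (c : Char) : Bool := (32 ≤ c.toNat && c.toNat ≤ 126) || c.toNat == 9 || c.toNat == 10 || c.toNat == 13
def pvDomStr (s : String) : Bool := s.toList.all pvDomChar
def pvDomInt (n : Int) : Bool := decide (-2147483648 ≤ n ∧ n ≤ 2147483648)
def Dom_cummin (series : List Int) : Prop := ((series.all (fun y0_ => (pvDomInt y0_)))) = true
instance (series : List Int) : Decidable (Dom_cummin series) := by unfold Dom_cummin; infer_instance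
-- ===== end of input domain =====

-- B computes each entry independently as the minimum of the prefix series[:i+1] (nested scans) instead of A's single stateful pass; objective: alternative.


-- ===== PORT A =====
-- the first-element read and the in-loop index reads are always in range under Pre_;
-- pyGetD with default 0 is exact there (the empty list, where Python raises, is outside Pre_).
def cummin (series : List Int) : List Int :=
  match series with
  | [] => []  -- reading the first element raises IndexError in Python on the empty list; excluded by Pre_cummin
  | s0 :: _ =>
    (PySem.List.pyRange 0 ((series.length : Int) - 1) 1).foldl
      (fun min_list i =>
        if PySem.List.pyGetD min_list i 0 < PySem.List.pyGetD series (i + 1) 0 then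
          min_list ++ [PySem.List.pyGetD min_list i 0]
        else
          min_list ++ [PySem.List.pyGetD series (i + 1) 0])
      [s0]

-- ===== PORT B =====
-- the prefix slice is nonempty for each index i of the range, so min? is `some`; getD 0 is exact there.
def cummin_alt (series : List Int) : List Int :=
  (PySem.List.pyRange 0 (series.length : Int) 1).map
    (fun i => (PySem.List.min? (PySem.List.slice series none (some (i + 1))) (fun y => y)).getD 0)

-- ===== PRECONDITION & SPEC =====
-- Pre_ excludes only the empty list, on which Python A raises IndexError at its initial read of the first element.
def Pre_cummin (series : List Int) : Prop := series ≠ []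
instance (series : List Int) : Decidable (Pre_cummin series) := by unfold Pre_cummin; infer_instance
def pvWitness_cummin : List Int := ([3, 1, 2])
def Spec_cummin (series : List Int) (out : List Int) : Prop := out = cummin_alt series
instance (series : List Int) (out : List Int) : Decidable (Spec_cummin series out) := by unfold Spec_cummin; infer_instance

-- ===== CLAIM (what is proved, stated in full; the proofs are below) =====
def Claim_equal_cummin : Prop := ∀ (series : List Int), Dom_cummin series → Pre_cummin series → Spec_cummin series (cummin series)

-- ===== LEMMAS AND PROOFS =====

/-- One comparison step of A: keep `m` iff `m < x`. -/
def pvStep (m x : Int) : Int := if m < x then m else x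

/-- The cumulative-minimum tail A produces for running minimum `m`. -/
def pvScan (m : Int) : List Int → List Int
  | [] => []
  | x :: xs => pvStep m x :: pvScan (pvStep m x) xs

/-- The running minimum after consuming `xs` from `m`. -/
def pvLast (m : Int) (xs : List Int) : Int := xs.foldl pvStep m

theorem pvStep_eq_min (m x : Int) : pvStep m x = min m x := by
  unfold pvStep; rw [min_def]; split_ifs with h1 h2 h2 <;> omega

theorem pvScan_snoc (m : Int) (xs : List Int) (x : Int) :
    pvScan m (xs ++ [x]) = pvScan m xs ++ [pvStep (pvLast m xs) x] := by
  induction xs generalizing m with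
  | nil => simp [pvScan, pvLast]
  | cons y ys ih => simp [pvScan, pvLast, List.foldl_cons] at *; simpa [pvLast] using ih (pvStep m y)

theorem pvGet_last (m : Int) (xs : List Int) :
    (m :: pvScan m xs).getD xs.length 0 = pvLast m xs := by
  induction xs generalizing m with
  | nil => simp [pvScan, pvLast]
  | cons x ys ih =>
    simp only [pvScan, pvLast, List.length_cons, List.getD_cons_succ, List.foldl_cons]
    exact ih (pvStep m x)

/-- A's fold invariant: after the first `k` iterations the output list is `s0 :: pvScan s0 (rest.take k)`. -/
theorem pvA_fold (s0 : Int) (rest : List Int) (k : Nat) (hk : k ≤ rest.length) :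
    (PySem.List.pyRange 0 (k : Int) 1).foldl
      (fun min_list i =>
        if PySem.List.pyGetD min_list i 0 < PySem.List.pyGetD (s0 :: rest) (i + 1) 0 then
          min_list ++ [PySem.List.pyGetD min_list i 0]
        else
          min_list ++ [PySem.List.pyGetD (s0 :: rest) (i + 1) 0])
      [s0] = s0 :: pvScan s0 (rest.take k) := by
  induction k with
  | zero => simp [PySem.List.pyRange_one_eq_nil, pvScan]
  | succ k ih =>
    have hk' : k ≤ rest.length := Nat.le_of_succ_le hk
    have hklt : k < rest.length := hk
    have hcast : ((k + 1 : Nat) : Int) = (k : Int) + 1 := by push_cast; ring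
    rw [hcast, PySem.List.pyRange_one_succ_right (by positivity), List.foldl_append, ih hk']
    have hget1 : PySem.List.pyGetD (s0 :: pvScan s0 (rest.take k)) ((k : Int)) 0
        = pvLast s0 (rest.take k) := by
      rw [PySem.List.pyGetD_natCast]
      have := pvGet_last s0 (rest.take k)
      rwa [List.length_take_of_le hk'] at this
    have hget2 : PySem.List.pyGetD (s0 :: rest) ((k : Int) + 1) 0 = rest[k] := by
      have hc : ((k : Int) + 1) = ((k + 1 : Nat) : Int) := by push_cast; ring
      rw [hc, PySem.List.pyGetD_natCast, List.getD_cons_succ]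
      simp [List.getD, List.getElem?_eq_getElem hklt]
    have htake : rest.take (k + 1) = rest.take k ++ [rest[k]] := by
      rw [List.take_add_one]
      simp [List.getElem?_eq_getElem hklt]
    simp only [List.foldl_cons, List.foldl_nil, hget1, hget2, htake, pvScan_snoc]
    by_cases h : pvLast s0 (rest.take k) < rest[k] <;> simp [pvStep, h]

/-- A's scan equals the table of prefix minima. -/
theorem pvScan_eq_prefix_mins (rest : List Int) (m : Int) :
    m :: pvScan m rest
      = (List.range (rest.length + 1)).map (fun k => (rest.take k).foldl min m) := by
  induction rest generalizing m with
  | nil => simp [pvScan]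
  | cons x ys ih =>
    have h1 : List.range (ys.length + 1 + 1)
        = 0 :: (List.range (ys.length + 1)).map Nat.succ := List.range_succ_eq_map
    rw [List.length_cons, h1]
    simp only [List.map_cons, List.take_zero, List.foldl_nil, List.map_map]
    have h2 : ((fun k => ((x :: ys).take k).foldl min m) ∘ Nat.succ)
        = fun k => (ys.take k).foldl min (min m x) := by
      funext k; simp [List.take_succ_cons]
    rw [h2, ← ih (min m x)]
    simp [pvScan, pvStep_eq_min]

-- ===== VERDICT (by name: the statement is the Claim_ definition above) =====
theorem cummin_spec : Claim_equal_cummin := by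
  intro series _ hpre
  match series with
  | [] => exact absurd rfl hpre
  | s0 :: rest =>
    show cummin (s0 :: rest) = cummin_alt (s0 :: rest)
    have hA : cummin (s0 :: rest) = s0 :: pvScan s0 rest := by
      simp only [cummin]
      have hlen : ((s0 :: rest).length : Int) - 1 = (rest.length : Int) := by simp
      rw [hlen, pvA_fold s0 rest rest.length le_rfl, List.take_length]
    have hB : cummin_alt (s0 :: rest)
        = (List.range (rest.length + 1)).map (fun k => (rest.take k).foldl min s0) := by
      simp only [cummin_alt]
      rw [PySem.List.pyRange_one]
      simp only [sub_zero, Int.toNat_natCast, List.map_map]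
      refine List.map_congr_left (fun k _ => ?_)
      have hb : (0 : Int) + (k : Int) + 1 = ((k + 1 : Nat) : Int) := by push_cast; ring
      simp only [Function.comp, hb, PySem.List.slice_to_natCast, List.take_succ_cons,
        PySem.List.min?_id_cons, Option.getD_some]
    rw [hA, hB, pvScan_eq_prefix_mins]
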